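-- pv_equiv track=rewrite | github.com/v3sk0o0/codeforces | F/1472F.py | solve
-- ===== SOURCE A (Python) =====
-- import operator
--
-- def partion_check(b_) -> bool:
--     location = 0
--     row = 1
--     _current_row = None
--     active_block = None
--     for _index, block in enumerate(b_):
--
--         if not active_block:
--             active_block = block
--             continue
--         if active_block:
--
--             if active_block[row] + 1 == block:
--                 return False
--
--             if active_block[location] == block[location]:
--                 if (block[row] - active_block[row]) % 2 != 1:
--                     return False
--
--             else:
--                 if (block[row] - active_block[row]) % 2 != 0:
--                     return False
--             active_block = None
--     return not active_block
--
-- def solve(a_) -> bool: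
--     a_.sort(key=operator.itemgetter(1))
--     b_ = []
--     for block in a_:
--         if not b_:
--             b_.append(block)
--             continue
--         last_block = b_[-1]
--         if last_block[1] == block[1]:
--             b_.pop()
--             if not partion_check(b_):
--                 return False
--             b_ = []
--             continue
--         b_.append(block)
--     return partion_check(b_)
-- ===== SOURCE B (Python) =====
-- import operator
--
-- def solve(a_) -> bool:
--     a_.sort(key=operator.itemgetter(1))
--     i, n = 0, len(a_)
--     while i < n:
--         if i + 1 == n:
--             return False
--         a, b = a_[i], a_[i + 1]
--         if a[1] == b[1]:
--             i += 2
--             continue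
--         if (b[1] - a[1]) % 2 != (1 if a[0] == b[0] else 0):
--             return False
--         if i + 2 < n and b[1] == a_[i + 2][1]:
--             return False
--         i += 2
--     return True
-- ===== Notes on version B (the rewrite author's own statement) =====
-- stated objective: simpler
-- what changed: A builds per-segment lists while scanning (append/pop/reset) and validates each with a separate stateful checker that toggles an active_block; B materialises nothing: it walks the sorted list once, consuming two blocks per step with a one-element lookahead, deciding boundary, parity and split-pair failure locally, and drops A's dead int-vs-tuple comparison.
import Mathlib
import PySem

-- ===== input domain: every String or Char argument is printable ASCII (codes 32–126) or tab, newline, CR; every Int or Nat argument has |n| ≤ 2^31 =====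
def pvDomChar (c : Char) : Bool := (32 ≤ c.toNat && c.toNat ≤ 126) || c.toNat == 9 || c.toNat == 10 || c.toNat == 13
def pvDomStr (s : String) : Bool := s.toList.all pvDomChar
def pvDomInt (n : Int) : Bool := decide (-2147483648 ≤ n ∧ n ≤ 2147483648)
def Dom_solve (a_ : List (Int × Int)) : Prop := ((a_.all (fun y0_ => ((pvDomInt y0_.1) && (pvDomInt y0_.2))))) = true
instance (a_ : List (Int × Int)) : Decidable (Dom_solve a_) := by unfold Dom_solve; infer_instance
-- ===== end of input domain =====

-- B replaces A's segment-building + stateful checker with one lookahead pass over the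
-- sorted list consuming two blocks per step (objective: simpler, same cost). Both
-- Pythons sort a_ in place; the equivalence proved here is about the return value.

-- ===== PORT A =====
-- partion_check: stateful walk toggling active_block; `active_block[1] + 1 == block`
-- compares an int to a tuple, hence is always False in Python — ported exactly as the
-- always-false test it is (omitted branch).
def partionCheckGo (b_ : List (Int × Int)) (active : Option (Int × Int)) : Bool :=
  match b_, active with
  | [], active => active.isNone
  | block :: rest, none => partionCheckGo rest (some block)
  | block :: rest, some ab =>
    -- `if active_block[1] + 1 == block: return False` : int == tuple, always False
    if ab.1 = block.1 then
      if PySem.Int.mod (block.2 - ab.2) 2 ≠ 1 then false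
      else partionCheckGo rest none
    else
      if PySem.Int.mod (block.2 - ab.2) 2 ≠ 0 then false
      else partionCheckGo rest none

def partionCheck (b_ : List (Int × Int)) : Bool := partionCheckGo b_ none

def solveGo (l : List (Int × Int)) (b_ : List (Int × Int)) : Bool :=
  match l with
  | [] => partionCheck b_
  | block :: rest =>
    match b_ with
    | [] => solveGo rest [block]
    | _ :: _ =>
      let last_block := b_.getLastD (0, 0)   -- b_[-1], b_ nonempty here
      if last_block.2 = block.2 then
        let b2 := b_.dropLast                -- b_.pop()
        if ¬ partionCheck b2 then false
        else solveGo rest []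
      else solveGo rest (b_ ++ [block])

def solve (a_ : List (Int × Int)) : Bool :=
  solveGo (PySem.List.sorted a_ (fun p => p.2)) []

-- ===== PORT B =====
-- the while loop over indices i, i+1 with lookahead i+2, as recursion on the rest of
-- the list (i < n ↔ list nonempty; i+1 == n ↔ singleton; `i+2 < n and b[1]==a_[i+2][1]`
-- is the head? test on the remainder)
def checkGo (l : List (Int × Int)) : Bool :=
  match l with
  | [] => true
  | [_] => false
  | a :: b :: rest =>
    if a.2 = b.2 then checkGo rest
    else if PySem.Int.mod (b.2 - a.2) 2 ≠ (if a.1 = b.1 then 1 else 0) then false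
    else if rest.head?.any (fun c => b.2 == c.2) then false
    else checkGo rest

def solve_alt (a_ : List (Int × Int)) : Bool :=
  checkGo (PySem.List.sorted a_ (fun p => p.2))

-- ===== PRECONDITION & SPEC =====
def Spec_solve (a_ : List (Int × Int)) (out : Bool) : Prop := out = solve_alt a_
instance (a_ : List (Int × Int)) (out : Bool) : Decidable (Spec_solve a_ out) := by unfold Spec_solve; infer_instance

-- ===== CLAIM (what is proved, stated in full; the proofs are below) =====
def Claim_equal_solve : Prop := ∀ (a_ : List (Int × Int)), Dom_solve a_ → Spec_solve a_ (solve a_)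

-- ===== LEMMAS AND PROOFS =====

-- proof device: A's run is characterised as 'split into segments, each segment even
-- with good pairs'; then that characterisation is shown equal to checkGo.
def segPairs (seg : List (Int × Int)) : Bool :=
  match seg with
  | a :: b :: rest =>
    if a.1 = b.1 then
      if PySem.Int.mod (b.2 - a.2) 2 ≠ 1 then false else segPairs rest
    else
      if PySem.Int.mod (b.2 - a.2) 2 ≠ 0 then false else segPairs rest
  | _ => true

def segOk (seg : List (Int × Int)) : Bool :=
  decide (seg.length % 2 = 0) && segPairs seg

def segLoop (l : List (Int × Int)) (segs : List (List (Int × Int)))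
    (cur : List (Int × Int)) : List (List (Int × Int)) × List (Int × Int) :=
  match l with
  | [] => (segs, cur)
  | block :: rest =>
    match cur with
    | [] => segLoop rest segs [block]
    | _ :: _ =>
      if (cur.getLastD (0, 0)).2 = block.2 then
        segLoop rest (segs ++ [cur.dropLast]) []
      else segLoop rest segs (cur ++ [block])

def Gfun (l : List (Int × Int)) (cur : List (Int × Int)) : Bool :=
  ((segLoop l [] cur).1 ++ [(segLoop l [] cur).2]).all segOk

theorem partionCheckGo_eq : ∀ (b_ : List (Int × Int)),
    partionCheckGo b_ none = (decide (b_.length % 2 = 0) && segPairs b_)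
  | [] => by simp [partionCheckGo, segPairs]
  | [a] => by simp [partionCheckGo, segPairs]
  | a :: b :: rest => by
    have ih := partionCheckGo_eq rest
    have hm : decide ((a :: b :: rest).length % 2 = 0)
        = decide ((rest).length % 2 = 0) := by
      refine decide_eq_decide.mpr ?_
      simp only [List.length_cons]; omega
    simp only [partionCheckGo, segPairs, ih, hm]
    split_ifs <;> simp

theorem partionCheck_eq_segOk (b_ : List (Int × Int)) : partionCheck b_ = segOk b_ := by
  rw [partionCheck, partionCheckGo_eq, segOk]

theorem segLoop_prefix (l : List (Int × Int)) (segs : List (List (Int × Int)))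
    (cur : List (Int × Int)) :
    segLoop l segs cur = (segs ++ (segLoop l [] cur).1, (segLoop l [] cur).2) := by
  induction l generalizing segs cur with
  | nil => simp [segLoop]
  | cons block rest ih =>
    match cur with
    | [] => simp only [segLoop]; exact ih segs [block]
    | c :: cs =>
      simp only [segLoop]
      split_ifs with h
      · rw [ih (segs ++ [(c :: cs).dropLast]), ih ([] ++ [(c :: cs).dropLast])]
        simp
      · exact ih segs _

-- A equals the segment characterisation
theorem solveGo_eq (l : List (Int × Int)) (cur : List (Int × Int)) :
    solveGo l cur = Gfun l cur := by
  induction l generalizing cur with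
  | nil => simp [solveGo, segLoop, Gfun, partionCheck_eq_segOk]
  | cons block rest ih =>
    match cur with
    | [] => simp only [solveGo, segLoop, Gfun]; exact ih [block]
    | c :: cs =>
      simp only [solveGo, segLoop, Gfun]
      split_ifs with h hpc
      · rw [ih [], segLoop_prefix rest ([] ++ [(c :: cs).dropLast]) []]
        have hseg : segOk ((c :: cs).dropLast) = true := by
          rw [← partionCheck_eq_segOk]; simpa using hpc
        simp [Gfun, hseg]
      · rw [segLoop_prefix rest ([] ++ [(c :: cs).dropLast]) []]
        have hseg : segOk ((c :: cs).dropLast) = false := by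
          rw [← partionCheck_eq_segOk]; simpa using hpc
        simp [hseg]
      · exact ih (c :: cs ++ [block])

theorem segPairs_append : ∀ (p r : List (Int × Int)), p.length % 2 = 0 →
    segPairs (p ++ r) = (segPairs p && segPairs r)
  | [], r => by simp [segPairs]
  | [x], r => by intro hp; simp at hp
  | a :: b :: p', r => by
    intro hp
    have h2 : p'.length % 2 = 0 := by simp at hp; omega
    simp only [List.cons_append, segPairs, segPairs_append p' r h2]
    split_ifs <;> simp

theorem segPairs_ne_nil (p : List (Int × Int)) (h : segPairs p = false) : p ≠ [] := by
  intro he; subst he; simp [segPairs] at h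

theorem segOk_odd (s : List (Int × Int)) (h : s.length % 2 = 1) : segOk s = false := by
  have : ¬ (s.length % 2 = 0) := by omega
  simp [segOk, this]

-- a segment state containing an even-aligned broken pair forces A to fail
theorem Gfun_bad : ∀ (l p q : List (Int × Int)), p.length % 2 = 0 → segPairs p = false →
    Gfun l (p ++ q) = false := by
  intro l
  induction l with
  | nil =>
    intro p q hp hb
    have hso : segOk (p ++ q) = false := by
      rw [segOk, segPairs_append p q hp, hb]; simp
    simp [Gfun, segLoop, hso]
  | cons block rest ih =>
    intro p q hp hb
    have hne : p ≠ [] := segPairs_ne_nil p hb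
    have hcur : p ++ q ≠ [] := by simp [hne]
    rcases hpq : p ++ q with _ | ⟨c, cs⟩
    · exact absurd hpq hcur
    · rw [Gfun]
      simp only [segLoop]
      split_ifs with h
      · rw [segLoop_prefix rest ([] ++ [(c :: cs).dropLast]) []]
        have hseg : segOk ((c :: cs).dropLast) = false := by
          rw [← hpq]
          match q with
          | [] =>
            have h2 : (p ++ ([] : List (Int × Int))).dropLast.length % 2 = 1 := by
              rw [List.length_dropLast]
              have := List.length_pos_iff.mpr hne
              simp only [List.append_nil]
              omega
            exact segOk_odd _ h2
          | d :: ds =>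
            have hd : (p ++ d :: ds).dropLast = p ++ (d :: ds).dropLast := by
              rw [List.dropLast_append_of_ne_nil]; simp
            rw [hd, segOk, segPairs_append p _ hp, hb]
            simp
        simp [hseg]
      · have : segLoop rest [] (c :: cs ++ [block]) = segLoop rest [] (p ++ (q ++ [block])) := by
          rw [show c :: cs ++ [block] = (c :: cs) ++ [block] from rfl, ← hpq,
            List.append_assoc]
        rw [this, ← Gfun]
        exact ih p (q ++ [block]) hp hb

theorem getLastD_append_cons (p : List (Int × Int)) (a : Int × Int)
    (q : List (Int × Int)) : ((p ++ a :: q).getLastD (0,0)) = ((a :: q).getLastD (0,0)) := by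
  induction p with
  | nil => rfl
  | cons x xs ih => rw [List.cons_append, List.getLastD_cons]; simpa using ih

theorem segLoop_cons_cons (block : Int × Int) (rest : List (Int × Int))
    (segs : List (List (Int × Int))) (c : Int × Int) (cs : List (Int × Int)) :
    segLoop (block :: rest) segs (c :: cs)
      = (if ((c :: cs).getLastD (0, 0)).2 = block.2 then
           segLoop rest (segs ++ [(c :: cs).dropLast]) []
         else segLoop rest segs (c :: cs ++ [block])) := rfl

theorem checkGo_cons2 (a b : Int × Int) (rest : List (Int × Int)) :
    checkGo (a :: b :: rest)
      = (if a.2 = b.2 then checkGo rest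
         else if PySem.Int.mod (b.2 - a.2) 2 ≠ (if a.1 = b.1 then 1 else 0) then false
         else if rest.head?.any (fun c => b.2 == c.2) then false
         else checkGo rest) := rfl

-- the segment characterisation equals B's lookahead pass
theorem Gfun_eq_checkGo : ∀ (l cur : List (Int × Int)), cur.length % 2 = 0 →
    segPairs cur = true →
    (∀ c rest', l = c :: rest' → cur ≠ [] → (cur.getLastD (0,0)).2 ≠ c.2) →
    Gfun l cur = checkGo l
  | [], cur => by
    intro he hp _
    simp [Gfun, segLoop, checkGo, segOk, he, hp]
  | [x], cur => by
    intro he hp hlast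
    have hstep : segLoop [x] [] cur = ([], cur ++ [x]) := by
      match cur with
      | [] => simp [segLoop]
      | c :: cs =>
        have hne := hlast x [] rfl (by simp)
        rw [segLoop_cons_cons, if_neg hne]
        rfl
    have hodd : (cur ++ [x]).length % 2 = 1 := by simp; omega
    rw [Gfun, hstep]
    simp [checkGo, segOk_odd _ hodd]
  | a :: b :: rest, cur => by
    intro he hp hlast
    -- first step: a is appended to cur (no boundary, by hlast)
    have hstep1 : segLoop (a :: b :: rest) [] cur = segLoop (b :: rest) [] (cur ++ [a]) := by
      match cur with
      | [] => simp [segLoop]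
      | c :: cs =>
        have hne := hlast a (b :: rest) rfl (by simp)
        rw [segLoop_cons_cons, if_neg hne]
    have hlast1 : ((cur ++ [a]).getLastD (0,0)) = a := by
      match cur with
      | [] => rfl
      | c :: cs => exact getLastD_append_cons (c :: cs) a []
    by_cases hab : a.2 = b.2
    · -- boundary between a and b: segment cur is emitted, pair dropped
      have hstep2 : segLoop (b :: rest) [] (cur ++ [a]) = segLoop rest [cur] [] := by
        rcases hca : cur ++ [a] with _ | ⟨c, cs⟩
        · simp at hca
        · have hcnd : ((c :: cs).getLastD (0, 0)).2 = b.2 := by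
            rw [← hca, hlast1]; exact hab
          rw [segLoop_cons_cons, if_pos hcnd,
            show (c :: cs).dropLast = cur from by rw [← hca]; exact List.dropLast_concat,
            List.nil_append]
      have hcur : segOk cur = true := by simp [segOk, he, hp]
      rw [Gfun, hstep1, hstep2, segLoop_prefix rest [cur] []]
      have hrec := Gfun_eq_checkGo rest [] rfl rfl (by intro c r' _ hc; exact absurd rfl hc)
      rw [Gfun] at hrec
      simp only [checkGo, if_pos hab]
      simp only [List.cons_append, List.all_cons, hcur,
        Bool.true_and]
      simpa using hrec
    · -- no boundary: b is appended too
      have hstep2 : segLoop (b :: rest) [] (cur ++ [a]) = segLoop rest [] (cur ++ [a, b]) := by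
        rcases hca : cur ++ [a] with _ | ⟨c, cs⟩
        · simp at hca
        · have hcnd : ¬ ((c :: cs).getLastD (0, 0)).2 = b.2 := by
            rw [← hca, hlast1]; exact hab
          rw [segLoop_cons_cons, if_neg hcnd,
            show c :: cs ++ [b] = (c :: cs) ++ [b] from rfl, ← hca, List.append_assoc]
          rfl
      have hlast2 : ((cur ++ [a, b]).getLastD (0,0)) = b := by
        match cur with
        | [] => rfl
        | c :: cs => exact getLastD_append_cons (c :: cs) a [b]
      have he2 : (cur ++ [a, b]).length % 2 = 0 := by simp; omega
      have hps : segPairs (cur ++ [a, b])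
          = (if a.1 = b.1 then
              if PySem.Int.mod (b.2 - a.2) 2 ≠ 1 then false else true
             else
              if PySem.Int.mod (b.2 - a.2) 2 ≠ 0 then false else true) := by
        rw [segPairs_append cur [a, b] he, hp]
        simp [segPairs]
      by_cases hpar : PySem.Int.mod (b.2 - a.2) 2 ≠ (if a.1 = b.1 then 1 else 0)
      · -- bad pair: both sides false
        have hbad : segPairs (cur ++ [a, b]) = false := by
          rw [hps]; split_ifs with h1 h2 h3 <;> first | rfl |
            (exfalso; apply hpar; simp_all)
        have hfb : Gfun rest (cur ++ [a, b]) = false := by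
          have := Gfun_bad rest (cur ++ [a, b]) [] he2 hbad
          simpa using this
        rw [Gfun, hstep1, hstep2, ← Gfun, hfb, checkGo_cons2, if_neg hab, if_pos hpar]
      · -- good pair
        have hgood : segPairs (cur ++ [a, b]) = true := by
          rw [hps]; split_ifs with h1 h2 h3 <;> first | rfl |
            (exfalso; apply hpar; simp_all)
        rw [Gfun, hstep1, hstep2, ← Gfun]
        match rest with
        | [] =>
          rw [Gfun_eq_checkGo [] (cur ++ [a, b]) he2 hgood (by intro c r' h; cases h),
            checkGo_cons2, if_neg hab, if_neg hpar]
          simp [checkGo]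
        | c :: rest' =>
          by_cases hbc : b.2 = c.2
          · -- boundary splits the pair: segment cur ++ [a] is odd, A fails too
            have hstep3 : segLoop (c :: rest') [] (cur ++ [a, b])
                = segLoop rest' [(cur ++ [a, b]).dropLast] [] := by
              rcases hca : cur ++ [a, b] with _ | ⟨d, ds⟩
              · simp at hca
              · have hcnd : ((d :: ds).getLastD (0, 0)).2 = c.2 := by
                  rw [← hca, hlast2]; exact hbc
                rw [segLoop_cons_cons, if_pos hcnd, List.nil_append]
            have hdrop : (cur ++ [a, b]).dropLast = cur ++ [a] := by
              rw [show cur ++ [a, b] = (cur ++ [a]) ++ [b] by simp]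
              exact List.dropLast_concat
            have hodd : (cur ++ [a]).length % 2 = 1 := by simp; omega
            have hany : ((c :: rest').head?.any (fun d => b.2 == d.2)) = true := by
              simp [hbc]
            rw [Gfun, hstep3, hdrop, segLoop_prefix rest' [cur ++ [a]] [],
              checkGo_cons2, if_neg hab, if_neg hpar, hany]
            simp [segOk_odd _ hodd]
          · have hany : ((c :: rest').head?.any (fun d => b.2 == d.2)) = false := by
              simp [hbc]
            rw [Gfun_eq_checkGo (c :: rest') (cur ++ [a, b]) he2 hgood
              (by intro d r' hd _; cases hd; rw [hlast2]; exact hbc),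
              checkGo_cons2, if_neg hab, if_neg hpar, hany]
            simp

-- ===== VERDICT (by name: the statement is the Claim_ definition above) =====
theorem solve_spec : Claim_equal_solve := by
  intro a_ _
  unfold Spec_solve solve solve_alt
  rw [solveGo_eq]
  exact Gfun_eq_checkGo _ [] rfl rfl (by intro c r' _ hc; exact absurd rfl hc)
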